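-- pv_equiv track=rewrite | github.com/AP-MI-2021/lab-4-andreigut | main.py | replace_positives_with_biggest_common_factor_and_negatives_with_mirror
-- ===== SOURCE A (Python) =====
-- def get_biggest_common_factor(first, second):
--     '''
--     Returns the biggest common factor for given integers.
--     :param first: First integer.
--     :param second: Second integer.
--     :return: Biggest common factor between 'first' and 'second'.
--     '''
--     if first == 0:
--         return second
--     elif second == 0:
--         return first
--     while first != second:
--         if first > second:
--             first -= second
--         else:
--             second -= first
--     return first
--
-- def get_biggest_common_factor_of_all_positives(lst):
--     '''
--     Return the biggest common factor for all elements in list.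
--     :param lst: Input list of integers.
--     :return: Biggest common factor for all elements in list.
--     '''
--     biggest_common_factor = None
--     for element in lst:
--         if element > 0:
--             if biggest_common_factor is None:
--                 biggest_common_factor = element
--             else:
--                 biggest_common_factor = get_biggest_common_factor(biggest_common_factor, element)
--     return biggest_common_factor
--
-- def get_mirror(nr):
--     '''
--     Returns the mirror of this number, i.e. the number with digits in reverse order.
--     :param nr: Input number.
--     :return: The mirror of this number.
--     '''
--     if nr == 0:
--         return 0
--     mirror = int(str(abs(nr))[::-1])
--     sgn = nr // abs(nr)
--     return sgn * mirror
--
-- def replace_positives_with_biggest_common_factor_and_negatives_with_mirror(lst):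
--     '''
--    Return a list where positives are replaced by their biggest common factor and negatives by their mirror.
--    :param lst: Input list of integers
--    :return: A list where positives are replaced by their biggest common factor and negatives by their mirror.
--    '''
--     biggest_common_factor = get_biggest_common_factor_of_all_positives(lst)
--     result = []
--     for element in lst:
--         to_add = 0
--         if element > 0:
--             to_add = biggest_common_factor
--         elif element < 0:
--             to_add = get_mirror(element)
--         result.append(to_add)
--     return result
-- ===== SOURCE B (Python) =====
-- def _gcd(a, b):
--     # Euclidean gcd by remainder (gcd(0, b) = b covers the "no accumulator yet" case)
--     while b:
--         a, b = b, a % b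
--     return a
--
--
-- def _mirror_of_negative(x):
--     # digit-mirror of a negative number, computed arithmetically
--     n, rev = -x, 0
--     while n:
--         rev = rev * 10 + n % 10
--         n //= 10
--     return -rev
--
--
-- def replace_positives_with_biggest_common_factor_and_negatives_with_mirror(lst):
--     g = 0
--     for x in lst:
--         if x > 0:
--             g = _gcd(g, x)
--     return [g if x > 0 else (_mirror_of_negative(x) if x < 0 else 0) for x in lst]
-- ===== Notes on version B (the rewrite author's own statement) =====
-- stated objective: faster
-- what changed: GCD of the positives is computed with remainder-based Euclid folded over a plain int accumulator (0 as identity) instead of the subtraction loop over an Optional accumulator, and the digit-mirror is computed arithmetically (rev = rev*10 + n%10; n //= 10) instead of reversing the decimal string and re-parsing it; the output is built by a comprehension instead of an append loop.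
import Mathlib
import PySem

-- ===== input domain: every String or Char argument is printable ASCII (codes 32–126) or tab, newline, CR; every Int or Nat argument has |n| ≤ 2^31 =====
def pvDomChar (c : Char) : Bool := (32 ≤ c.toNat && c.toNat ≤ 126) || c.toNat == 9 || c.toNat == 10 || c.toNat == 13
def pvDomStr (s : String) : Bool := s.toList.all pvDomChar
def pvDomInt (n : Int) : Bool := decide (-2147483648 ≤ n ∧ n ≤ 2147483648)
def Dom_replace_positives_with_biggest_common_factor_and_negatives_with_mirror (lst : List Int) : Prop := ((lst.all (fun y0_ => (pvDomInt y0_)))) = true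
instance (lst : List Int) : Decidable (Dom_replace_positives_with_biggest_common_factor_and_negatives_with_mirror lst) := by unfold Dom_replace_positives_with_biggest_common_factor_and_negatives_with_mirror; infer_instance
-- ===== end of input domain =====

-- B replaces A's subtraction-loop gcd over an Optional accumulator by remainder-based Euclid
-- over an int accumulator (identity 0), and A's string-reversal digit-mirror by an arithmetic
-- digit loop; objective: faster (remainder gcd is logarithmic where subtraction is linear).

-- ===== PORT A =====

-- the `while first != second` subtraction loop of get_biggest_common_factor
-- (the `first ≤ 0 ∨ second ≤ 0` branch is only a totality guard: A only enters the loop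
--  with both arguments positive, where the Python loop terminates)
def pySubGcdLoop (first second : Int) : Int :=
  if first = second then first
  else if first ≤ 0 ∨ second ≤ 0 then first
  else if first > second then pySubGcdLoop (first - second) second
  else pySubGcdLoop first (second - first)
termination_by (first + second).toNat
decreasing_by all_goals omega

def get_biggest_common_factor (first second : Int) : Int :=
  if first = 0 then second
  else if second = 0 then first
  else pySubGcdLoop first second

def get_biggest_common_factor_of_all_positives (lst : List Int) : Option Int :=
  lst.foldl (fun biggest_common_factor element =>
    if element > 0 then
      match biggest_common_factor with
      | none => some element
      | some b => some (get_biggest_common_factor b element)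
    else biggest_common_factor) none

-- int(str(abs(nr))[::-1]); both slice? and ofStr? always return `some` here (a reversed
-- nonempty digit string always parses), so the .getD defaults are never used
def get_mirror (nr : Int) : Int :=
  if nr = 0 then 0
  else
    let mirror := (PySem.Int.ofStr?
      ((PySem.Str.slice? (PySem.Int.toStr |nr|) none none (-1)).getD "")).getD 0
    let sgn := PySem.Int.floordiv nr |nr|
    sgn * mirror

def replace_positives_with_biggest_common_factor_and_negatives_with_mirror (lst : List Int) : List Int :=
  let biggest_common_factor := get_biggest_common_factor_of_all_positives lst
  -- `result.append(to_add)` loop; when element > 0 the accumulator is necessarily `some`,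
  -- so the .getD 0 default is never used
  lst.foldl (fun result element =>
    result ++ [if element > 0 then biggest_common_factor.getD 0
               else if element < 0 then get_mirror element
               else 0]) []

-- ===== PORT B =====

-- `while b: a, b = b, a % b`
def pyGcdLoop (a b : Int) : Int :=
  if b = 0 then a else pyGcdLoop b (PySem.Int.mod a b)
termination_by b.natAbs
decreasing_by
  rcases lt_trichotomy b 0 with h | h | h
  · have := PySem.Int.mod_neg_bounds a h; omega
  · omega
  · have h1 := PySem.Int.mod_nonneg a h; have h2 := PySem.Int.mod_lt a h; omega

-- `while n: rev = rev*10 + n%10; n //= 10`  (the loop is only entered with n > 0,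
--  where Python's `while n:` is exactly `while n > 0:`; `n ≤ 0` is the exit/totality guard)
def pyMirrorLoop (n rev : Int) : Int :=
  if n ≤ 0 then rev
  else pyMirrorLoop (PySem.Int.floordiv n 10) (rev * 10 + PySem.Int.mod n 10)
termination_by n.toNat
decreasing_by
  have h10 : (0:Int) < 10 := by norm_num
  have := PySem.Int.floordiv_eq_ediv_of_pos (a := n) h10
  omega

def mirror_of_negative (x : Int) : Int := -(pyMirrorLoop (-x) 0)

def replace_positives_with_biggest_common_factor_and_negatives_with_mirror_alt (lst : List Int) : List Int :=
  let g := lst.foldl (fun g x => if x > 0 then pyGcdLoop g x else g) 0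
  lst.map (fun x => if x > 0 then g else if x < 0 then mirror_of_negative x else 0)

-- ===== PRECONDITION & SPEC =====
def Spec_replace_positives_with_biggest_common_factor_and_negatives_with_mirror (lst : List Int) (out : List Int) : Prop := out = replace_positives_with_biggest_common_factor_and_negatives_with_mirror_alt lst
instance (lst : List Int) (out : List Int) : Decidable (Spec_replace_positives_with_biggest_common_factor_and_negatives_with_mirror lst out) := by unfold Spec_replace_positives_with_biggest_common_factor_and_negatives_with_mirror; infer_instance

-- ===== CLAIM (what is proved, stated in full; the proofs are below) =====
def Claim_equal_replace_positives_with_biggest_common_factor_and_negatives_with_mirror : Prop := ∀ (lst : List Int), Dom_replace_positives_with_biggest_common_factor_and_negatives_with_mirror lst → Spec_replace_positives_with_biggest_common_factor_and_negatives_with_mirror lst (replace_positives_with_biggest_common_factor_and_negatives_with_mirror lst)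

-- ===== LEMMAS AND PROOFS =====

/-! #### gcd side -/

theorem pySubGcdLoop_eq_gcd (N : ℕ) : ∀ (a b : Int), (a + b).toNat ≤ N → 0 < a → 0 < b →
    pySubGcdLoop a b = (Int.gcd a b : Int) := by
  induction N with
  | zero => intro a b h ha hb; omega
  | succ N ih =>
    intro a b h ha hb
    rw [pySubGcdLoop]
    by_cases heq : a = b
    · subst heq
      simp [Int.gcd_self, Int.natAbs_of_nonneg ha.le]
    · rw [if_neg heq, if_neg (by omega)]
      by_cases hgt : a > b
      · rw [if_pos hgt, ih (a - b) b (by omega) (by omega) hb, Int.gcd_sub_self_left]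
      · rw [if_neg hgt, ih a (b - a) (by omega) ha (by omega), Int.gcd_sub_self_right]

theorem pyGcdLoop_eq_gcd (N : ℕ) : ∀ (a b : Int), b.natAbs ≤ N → 0 ≤ a → 0 ≤ b →
    pyGcdLoop a b = (Int.gcd a b : Int) := by
  induction N with
  | zero =>
    intro a b h ha hb
    have : b = 0 := by omega
    subst this
    rw [pyGcdLoop]
    simp [Int.natAbs_of_nonneg ha]
  | succ N ih =>
    intro a b h ha hb
    rw [pyGcdLoop]
    by_cases hb0 : b = 0
    · subst hb0; simp [Int.natAbs_of_nonneg ha]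
    · rw [if_neg hb0]
      have hbpos : 0 < b := by omega
      have h1 := PySem.Int.mod_nonneg a hbpos
      have h2 := PySem.Int.mod_lt a hbpos
      rw [ih b (PySem.Int.mod a b) (by omega) hb h1,
          PySem.Int.mod_eq_emod_of_pos hbpos, Int.gcd_comm, Int.gcd_emod]

theorem get_biggest_common_factor_eq_gcd (a b : Int) (ha : 0 < a) (hb : 0 < b) :
    get_biggest_common_factor a b = (Int.gcd a b : Int) := by
  rw [get_biggest_common_factor, if_neg (by omega), if_neg (by omega)]
  exact pySubGcdLoop_eq_gcd (a + b).toNat a b le_rfl ha hb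

def GAcc (acc : Option Int) (g : Int) : Prop :=
  (acc = none ∧ g = 0) ∨ (∃ v, acc = some v ∧ g = v ∧ 0 < v)

theorem gcd_fold_rel : ∀ (lst : List Int) (acc : Option Int) (g : Int), GAcc acc g →
    GAcc (lst.foldl (fun b e =>
            if e > 0 then (match b with | none => some e | some v => some (get_biggest_common_factor v e)) else b) acc)
         (lst.foldl (fun g x => if x > 0 then pyGcdLoop g x else g) g) := by
  intro lst
  induction lst with
  | nil => intro acc g h; exact h
  | cons x t ih =>
    intro acc g h
    simp only [List.foldl_cons]
    by_cases hx : x > 0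
    · rw [if_pos hx, if_pos hx]
      apply ih
      rcases h with ⟨h1, h2⟩ | ⟨v, h1, h2, h3⟩
      · subst h1 h2
        refine Or.inr ⟨x, rfl, ?_, hx⟩
        rw [pyGcdLoop_eq_gcd x.natAbs 0 x le_rfl le_rfl hx.le]
        simp [Int.natAbs_of_nonneg hx.le]
      · subst h1
        rcases h2 with rfl
        refine Or.inr ⟨get_biggest_common_factor g x, rfl, ?_, ?_⟩
        · rw [get_biggest_common_factor_eq_gcd g x h3 hx, pyGcdLoop_eq_gcd x.natAbs g x le_rfl h3.le hx.le]
        · rw [get_biggest_common_factor_eq_gcd g x h3 hx]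
          have : Int.gcd g x ≠ 0 := by
            simp [Int.gcd_eq_zero_iff]
            omega
          omega
    · rw [if_neg hx, if_neg hx]
      exact ih acc g h

theorem gcd_fold_isSome : ∀ (lst : List Int) (acc : Option Int),
    (∃ x ∈ lst, 0 < x) ∨ acc.isSome = true →
    (lst.foldl (fun b e =>
        if e > 0 then (match b with | none => some e | some v => some (get_biggest_common_factor v e)) else b) acc).isSome = true := by
  intro lst
  induction lst with
  | nil =>
    intro acc h
    rcases h with ⟨x, hx, _⟩ | h
    · simp at hx
    · exact h
  | cons y t ih =>
    intro acc h
    simp only [List.foldl_cons]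
    by_cases hy : y > 0
    · rw [if_pos hy]
      apply ih
      right
      rcases acc with _ | v <;> simp
    · rw [if_neg hy]
      apply ih
      rcases h with ⟨x, hx, hxp⟩ | h
      · rcases List.mem_cons.mp hx with rfl | hx
        · omega
        · exact Or.inl ⟨x, hx, hxp⟩
      · exact Or.inr h

/-! #### mirror side -/

theorem digitChar_toNat (d : ℕ) (h : d < 10) : (Nat.digitChar d).toNat - 48 = d := by
  interval_cases d <;> decide

theorem digit_not_intSpace (c : Char) (h : c.isDigit = true) : PySem.Int.isIntSpace c = false := by
  simp only [Char.isDigit] at h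
  simp only [PySem.Int.isIntSpace, Bool.or_eq_false_iff, decide_eq_false_iff_not]
  refine ⟨⟨⟨⟨⟨?_, ?_⟩, ?_⟩, ?_⟩, ?_⟩, ?_⟩ <;> (rintro rfl; revert h; decide)

theorem toDigitsCore_acc (f : ℕ) : ∀ (n : ℕ) (acc : List Char),
    Nat.toDigitsCore 10 f n acc = Nat.toDigitsCore 10 f n [] ++ acc := by
  induction f with
  | zero => intro n acc; simp [Nat.toDigitsCore]
  | succ f ih =>
    intro n acc
    simp only [Nat.toDigitsCore]
    by_cases h : n / 10 = 0
    · simp [h]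
    · rw [if_neg h, if_neg h, ih (n / 10) (Nat.digitChar (n % 10) :: acc),
          ih (n / 10) [Nat.digitChar (n % 10)]]
      simp

theorem toDigitsCore_fuel : ∀ (n f1 f2 : ℕ), n < f1 → n < f2 →
    Nat.toDigitsCore 10 f1 n [] = Nat.toDigitsCore 10 f2 n [] := by
  intro n
  induction n using Nat.strong_induction_on with
  | _ n ih =>
    intro f1 f2 h1 h2
    match f1, f2 with
    | g1 + 1, g2 + 1 =>
      simp only [Nat.toDigitsCore]
      by_cases h : n / 10 = 0
      · simp [h]
      · have hlt : n / 10 < n := Nat.div_lt_self (by omega) (by norm_num)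
        rw [if_neg h, if_neg h, toDigitsCore_acc, toDigitsCore_acc g2,
            ih (n / 10) hlt g1 g2 (by omega) (by omega)]

theorem toDigits_step (n : ℕ) (h : 10 ≤ n) :
    Nat.toDigits 10 n = Nat.toDigits 10 (n / 10) ++ [Nat.digitChar (n % 10)] := by
  have h0 : n / 10 ≠ 0 := by omega
  have hlt : n / 10 < n := Nat.div_lt_self (by omega) (by norm_num)
  simp only [Nat.toDigits]
  rw [show Nat.toDigitsCore 10 (n + 1) n [] =
        if n / 10 = 0 then [Nat.digitChar (n % 10)]
        else Nat.toDigitsCore 10 n (n / 10) [Nat.digitChar (n % 10)] from rfl,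
      if_neg h0, toDigitsCore_acc, toDigitsCore_fuel (n / 10) n (n / 10 + 1) hlt (by omega)]

theorem toDigits_small (n : ℕ) (h : n < 10) : Nat.toDigits 10 n = [Nat.digitChar n] := by
  have h0 : n / 10 = 0 := Nat.div_eq_of_lt h
  have h1 : n % 10 = n := Nat.mod_eq_of_lt h
  simp [Nat.toDigits, Nat.toDigitsCore, h0, h1]

theorem toDigits_all_digit (n : ℕ) : ∀ c ∈ Nat.toDigits 10 n, c.isDigit = true := by
  induction n using Nat.strong_induction_on with
  | _ n ih =>
    intro c hc
    by_cases h : n < 10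
    · rw [toDigits_small n h] at hc
      simp at hc
      subst hc
      exact (by interval_cases n <;> decide)
    · rw [toDigits_step n (by omega)] at hc
      rcases List.mem_append.mp hc with hc | hc
      · exact ih (n / 10) (Nat.div_lt_self (by omega) (by norm_num)) c hc
      · simp at hc
        subst hc
        exact (by have : n % 10 < 10 := Nat.mod_lt n (by norm_num); interval_cases hm : n % 10 <;> decide)

theorem dropWhile_intSpace_digits (l : List Char) (h : ∀ c ∈ l, c.isDigit = true) :
    List.dropWhile PySem.Int.isIntSpace l = l := by
  cases l with
  | nil => rfl
  | cons c t => rw [List.dropWhile_cons, digit_not_intSpace c (h c (by simp))]; simp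

theorem match_1_default (v : List Char → Option ℕ) (d : Char) (t : List Char)
    (h1 : d ≠ '-') (h2 : d ≠ '+') :
    PySem.Int.ofChars?.match_1 (fun _ => Option Int) (d :: t)
      (fun t => Option.map (fun n : Int => -n) (Option.bind (v t) (fun a : ℕ => pure ((a : Int)))))
      (fun t => Option.map (fun n : Int => n) (Option.bind (v t) (fun a : ℕ => pure ((a : Int)))))
      (fun t => Option.map (fun n : Int => n) (Option.bind (v t) (fun a : ℕ => pure ((a : Int))))) =
    Option.map (fun n : Int => n) (Option.bind (v (d :: t)) (fun a : ℕ => pure ((a : Int)))) := by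
  split
  · rename_i heq
    injection heq with he _
    exact absurd he h1
  · rename_i heq
    injection heq with he _
    exact absurd he h2
  · rfl

theorem ofChars?_digit_list (ds : List Char) (hne : ds ≠ []) (hlen : ds.length ≤ 10)
    (hdig : ∀ c ∈ ds, c.isDigit = true) :
    PySem.Int.ofChars? ds =
      some ((ds.foldl (fun a c => a * 10 + (c.toNat - 48)) 0 : ℕ) : Int) := by
  obtain ⟨v, hv, hd⟩ : ∃ v : List Char → Option ℕ,
      (∀ (ds : List Char), PySem.Int.ofChars? ds =
        PySem.Int.ofChars?.match_1 (fun _ => Option Int)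
          ((List.dropWhile PySem.Int.isIntSpace (List.dropWhile PySem.Int.isIntSpace ds).reverse).reverse)
          (fun t => Option.map (fun n : Int => -n) (Option.bind (v t) (fun a : ℕ => pure ((a : Int)))))
          (fun t => Option.map (fun n : Int => n) (Option.bind (v t) (fun a : ℕ => pure ((a : Int)))))
          (fun t => Option.map (fun n : Int => n) (Option.bind (v t) (fun a : ℕ => pure ((a : Int)))))) ∧
      (∀ (ds : List Char), ds ≠ [] → ds.length ≤ 10 → (∀ c ∈ ds, c.isDigit = true) →
        v ds = some (ds.foldl (fun a c => a * 10 + (c.toNat - 48)) 0)) := by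
    refine ⟨_, fun ds => rfl, ?_⟩
    intro ds hne hlen hdig
    rcases ds with _ | ⟨c1, _ | ⟨c2, _ | ⟨c3, _ | ⟨c4, _ | ⟨c5, _ | ⟨c6, _ | ⟨c7, _ | ⟨c8, _ | ⟨c9, _ | ⟨c10, _ | ⟨c11, rest⟩⟩⟩⟩⟩⟩⟩⟩⟩⟩⟩
    · exact absurd rfl hne
    ·
      have h1 : c1.isDigit = true := hdig c1 (by simp)
      conv_lhs => whnf
      rw [h1]
      conv_lhs => whnf
      rfl
    ·
      have h1 : c1.isDigit = true := hdig c1 (by simp)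
      have h2 : c2.isDigit = true := hdig c2 (by simp)
      conv_lhs => whnf
      rw [h1]
      conv_lhs => whnf
      rw [h2]
      conv_lhs => whnf
      rfl
    ·
      have h1 : c1.isDigit = true := hdig c1 (by simp)
      have h2 : c2.isDigit = true := hdig c2 (by simp)
      have h3 : c3.isDigit = true := hdig c3 (by simp)
      conv_lhs => whnf
      rw [h1]
      conv_lhs => whnf
      rw [h2]
      conv_lhs => whnf
      rw [h3]
      conv_lhs => whnf
      rfl
    ·
      have h1 : c1.isDigit = true := hdig c1 (by simp)
      have h2 : c2.isDigit = true := hdig c2 (by simp)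
      have h3 : c3.isDigit = true := hdig c3 (by simp)
      have h4 : c4.isDigit = true := hdig c4 (by simp)
      conv_lhs => whnf
      rw [h1]
      conv_lhs => whnf
      rw [h2]
      conv_lhs => whnf
      rw [h3]
      conv_lhs => whnf
      rw [h4]
      conv_lhs => whnf
      rfl
    ·
      have h1 : c1.isDigit = true := hdig c1 (by simp)
      have h2 : c2.isDigit = true := hdig c2 (by simp)
      have h3 : c3.isDigit = true := hdig c3 (by simp)
      have h4 : c4.isDigit = true := hdig c4 (by simp)
      have h5 : c5.isDigit = true := hdig c5 (by simp)
      conv_lhs => whnf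
      rw [h1]
      conv_lhs => whnf
      rw [h2]
      conv_lhs => whnf
      rw [h3]
      conv_lhs => whnf
      rw [h4]
      conv_lhs => whnf
      rw [h5]
      conv_lhs => whnf
      rfl
    ·
      have h1 : c1.isDigit = true := hdig c1 (by simp)
      have h2 : c2.isDigit = true := hdig c2 (by simp)
      have h3 : c3.isDigit = true := hdig c3 (by simp)
      have h4 : c4.isDigit = true := hdig c4 (by simp)
      have h5 : c5.isDigit = true := hdig c5 (by simp)
      have h6 : c6.isDigit = true := hdig c6 (by simp)
      conv_lhs => whnf
      rw [h1]
      conv_lhs => whnf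
      rw [h2]
      conv_lhs => whnf
      rw [h3]
      conv_lhs => whnf
      rw [h4]
      conv_lhs => whnf
      rw [h5]
      conv_lhs => whnf
      rw [h6]
      conv_lhs => whnf
      rfl
    ·
      have h1 : c1.isDigit = true := hdig c1 (by simp)
      have h2 : c2.isDigit = true := hdig c2 (by simp)
      have h3 : c3.isDigit = true := hdig c3 (by simp)
      have h4 : c4.isDigit = true := hdig c4 (by simp)
      have h5 : c5.isDigit = true := hdig c5 (by simp)
      have h6 : c6.isDigit = true := hdig c6 (by simp)
      have h7 : c7.isDigit = true := hdig c7 (by simp)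
      conv_lhs => whnf
      rw [h1]
      conv_lhs => whnf
      rw [h2]
      conv_lhs => whnf
      rw [h3]
      conv_lhs => whnf
      rw [h4]
      conv_lhs => whnf
      rw [h5]
      conv_lhs => whnf
      rw [h6]
      conv_lhs => whnf
      rw [h7]
      conv_lhs => whnf
      rfl
    ·
      have h1 : c1.isDigit = true := hdig c1 (by simp)
      have h2 : c2.isDigit = true := hdig c2 (by simp)
      have h3 : c3.isDigit = true := hdig c3 (by simp)
      have h4 : c4.isDigit = true := hdig c4 (by simp)
      have h5 : c5.isDigit = true := hdig c5 (by simp)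
      have h6 : c6.isDigit = true := hdig c6 (by simp)
      have h7 : c7.isDigit = true := hdig c7 (by simp)
      have h8 : c8.isDigit = true := hdig c8 (by simp)
      conv_lhs => whnf
      rw [h1]
      conv_lhs => whnf
      rw [h2]
      conv_lhs => whnf
      rw [h3]
      conv_lhs => whnf
      rw [h4]
      conv_lhs => whnf
      rw [h5]
      conv_lhs => whnf
      rw [h6]
      conv_lhs => whnf
      rw [h7]
      conv_lhs => whnf
      rw [h8]
      conv_lhs => whnf
      rfl
    ·
      have h1 : c1.isDigit = true := hdig c1 (by simp)
      have h2 : c2.isDigit = true := hdig c2 (by simp)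
      have h3 : c3.isDigit = true := hdig c3 (by simp)
      have h4 : c4.isDigit = true := hdig c4 (by simp)
      have h5 : c5.isDigit = true := hdig c5 (by simp)
      have h6 : c6.isDigit = true := hdig c6 (by simp)
      have h7 : c7.isDigit = true := hdig c7 (by simp)
      have h8 : c8.isDigit = true := hdig c8 (by simp)
      have h9 : c9.isDigit = true := hdig c9 (by simp)
      conv_lhs => whnf
      rw [h1]
      conv_lhs => whnf
      rw [h2]
      conv_lhs => whnf
      rw [h3]
      conv_lhs => whnf
      rw [h4]
      conv_lhs => whnf
      rw [h5]
      conv_lhs => whnf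
      rw [h6]
      conv_lhs => whnf
      rw [h7]
      conv_lhs => whnf
      rw [h8]
      conv_lhs => whnf
      rw [h9]
      conv_lhs => whnf
      rfl
    ·
      have h1 : c1.isDigit = true := hdig c1 (by simp)
      have h2 : c2.isDigit = true := hdig c2 (by simp)
      have h3 : c3.isDigit = true := hdig c3 (by simp)
      have h4 : c4.isDigit = true := hdig c4 (by simp)
      have h5 : c5.isDigit = true := hdig c5 (by simp)
      have h6 : c6.isDigit = true := hdig c6 (by simp)
      have h7 : c7.isDigit = true := hdig c7 (by simp)
      have h8 : c8.isDigit = true := hdig c8 (by simp)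
      have h9 : c9.isDigit = true := hdig c9 (by simp)
      have h10 : c10.isDigit = true := hdig c10 (by simp)
      conv_lhs => whnf
      rw [h1]
      conv_lhs => whnf
      rw [h2]
      conv_lhs => whnf
      rw [h3]
      conv_lhs => whnf
      rw [h4]
      conv_lhs => whnf
      rw [h5]
      conv_lhs => whnf
      rw [h6]
      conv_lhs => whnf
      rw [h7]
      conv_lhs => whnf
      rw [h8]
      conv_lhs => whnf
      rw [h9]
      conv_lhs => whnf
      rw [h10]
      conv_lhs => whnf
      rfl
    · simp at hlen; omega
  rw [hv ds]
  have hstrip : (List.dropWhile PySem.Int.isIntSpace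
      (List.dropWhile PySem.Int.isIntSpace ds).reverse).reverse = ds := by
    rw [dropWhile_intSpace_digits ds hdig, dropWhile_intSpace_digits ds.reverse
      (fun c hc => hdig c (List.mem_reverse.mp hc)), List.reverse_reverse]
  rw [hstrip]
  match ds, hne with
  | d :: t, _ =>
    have hd0 : d.isDigit = true := hdig d (by simp)
    have hminus : d ≠ '-' := by rintro rfl; revert hd0; decide
    have hplus : d ≠ '+' := by rintro rfl; revert hd0; decide
    rw [show PySem.Int.ofChars?.match_1 (fun _ => Option Int) (d :: t)
          (fun t => Option.map (fun n : Int => -n) (Option.bind (v t) (fun a : ℕ => pure ((a : Int)))))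
          (fun t => Option.map (fun n : Int => n) (Option.bind (v t) (fun a : ℕ => pure ((a : Int)))))
          (fun t => Option.map (fun n : Int => n) (Option.bind (v t) (fun a : ℕ => pure ((a : Int))))) =
        Option.map (fun n : Int => n) (Option.bind (v (d :: t)) (fun a : ℕ => pure ((a : Int)))) from ?_,
        hd (d :: t) (by simp) hlen hdig]
    · simp
    · rcases eq_or_ne d '-' with rfl | h1
      · exact absurd rfl hminus
      · rcases eq_or_ne d '+' with rfl | h2
        · exact absurd rfl hplus
        · exact match_1_default v d t h1 h2

def revNat (n rev : ℕ) : ℕ :=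
  if n = 0 then rev else revNat (n / 10) (rev * 10 + n % 10)
termination_by n
decreasing_by exact Nat.div_lt_self (by omega) (by norm_num)

theorem revNat_eq (n rev : ℕ) :
    revNat n rev = if n = 0 then rev else revNat (n / 10) (rev * 10 + n % 10) := by
  rw [revNat]

theorem foldl_reverse_toDigits (n : ℕ) (h : 0 < n) : ∀ (a : ℕ),
    (Nat.toDigits 10 n).reverse.foldl (fun a c => a * 10 + (c.toNat - 48)) a = revNat n a := by
  induction n using Nat.strong_induction_on with
  | _ n ih =>
    intro a
    by_cases hs : n < 10
    · rw [toDigits_small n hs]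
      simp [digitChar_toNat n hs]
      rw [revNat_eq, if_neg (by omega), revNat_eq]
      simp [Nat.div_eq_of_lt hs, Nat.mod_eq_of_lt hs]
    · rw [toDigits_step n (by omega)]
      simp only [List.reverse_append, List.reverse_cons, List.reverse_nil, List.nil_append,
        List.cons_append, List.foldl_cons, List.nil_append]
      rw [digitChar_toNat (n % 10) (Nat.mod_lt n (by norm_num)),
          ih (n / 10) (Nat.div_lt_self (by omega) (by norm_num)) (Nat.div_pos (by omega) (by norm_num)),
          revNat_eq n, if_neg (by omega)]

theorem pyMirrorLoop_eq_revNat (n : ℕ) : ∀ (rev : ℕ),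
    pyMirrorLoop (n : Int) (rev : Int) = (revNat n rev : Int) := by
  induction n using Nat.strong_induction_on with
  | _ n ih =>
    intro rev
    rw [pyMirrorLoop, revNat_eq]
    by_cases h : n = 0
    · simp [h]
    · rw [if_neg (by omega), if_neg h]
      have e1 : PySem.Int.floordiv (n : Int) 10 = ((n / 10 : ℕ) : Int) := by
        exact_mod_cast PySem.Int.floordiv_natCast n 10
      have e2 : PySem.Int.mod (n : Int) 10 = ((n % 10 : ℕ) : Int) := by
        exact_mod_cast PySem.Int.mod_natCast n 10
      rw [e1, e2]
      have : ((rev : Int) * 10 + ((n % 10 : ℕ) : Int)) = ((rev * 10 + n % 10 : ℕ) : Int) := by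
        push_cast; ring
      rw [this, ih (n / 10) (Nat.div_lt_self (by omega) (by norm_num))]

theorem get_mirror_eq (x : Int) (hx : x < 0) (hb : -2147483648 ≤ x) :
    get_mirror x = mirror_of_negative x := by
  have hne : x ≠ 0 := by omega
  have habs : |x| = -x := abs_of_neg hx
  have hnat : ((x.natAbs : ℕ) : Int) = -x := by omega
  have hpos : 0 < x.natAbs := by omega
  rw [get_mirror, if_neg hne]
  have hchars : (PySem.Int.toStr |x|).toList = Nat.toDigits 10 x.natAbs := by
    rw [PySem.Int.toList_toStr, PySem.Int.toChars]
    rw [if_neg (by omega)]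
    congr 1
    omega
  have hrev : (PySem.Str.slice? (PySem.Int.toStr |x|) none none (-1)).getD "" =
      String.ofList (Nat.toDigits 10 x.natAbs).reverse := by
    rw [PySem.Str.slice?_none_none_neg_one, hchars]
    rfl
  rw [hrev]
  have hlen : (Nat.toDigits 10 x.natAbs).reverse.length ≤ 10 := by
    rw [List.length_reverse]
    exact Nat.toDigits_length 10 x.natAbs 10 (by norm_num) (by omega)
  have hne2 : (Nat.toDigits 10 x.natAbs).reverse ≠ [] := by
    have hnn : Nat.toDigits 10 x.natAbs ≠ [] := by
      by_cases h : x.natAbs < 10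
      · rw [toDigits_small _ h]; simp
      · rw [toDigits_step _ (by omega)]; simp
    simpa using hnn
  have hdig : ∀ c ∈ (Nat.toDigits 10 x.natAbs).reverse, c.isDigit = true :=
    fun c hc => toDigits_all_digit x.natAbs c (List.mem_reverse.mp hc)
  have hparse : PySem.Int.ofStr? (String.ofList (Nat.toDigits 10 x.natAbs).reverse) =
      some ((revNat x.natAbs 0 : ℕ) : Int) := by
    rw [PySem.Int.ofStr?_ofList, ofChars?_digit_list _ hne2 hlen hdig,
        foldl_reverse_toDigits x.natAbs hpos 0]
  rw [hparse]
  have hsgn : PySem.Int.floordiv x |x| = -1 := by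
    rw [habs]
    rw [PySem.Int.floordiv_eq_iff_of_pos (by omega)]
    constructor <;> omega
  rw [hsgn]
  rw [mirror_of_negative]
  rw [show -x = ((x.natAbs : ℕ) : Int) by omega]
  have hm := pyMirrorLoop_eq_revNat x.natAbs 0
  rw [Nat.cast_zero] at hm
  dsimp only
  rw [hm, Option.getD_some]
  ring

-- ===== VERDICT (by name: the statement is the Claim_ definition above) =====
theorem replace_positives_with_biggest_common_factor_and_negatives_with_mirror_spec : Claim_equal_replace_positives_with_biggest_common_factor_and_negatives_with_mirror := by
  intro lst hdom
  unfold Spec_replace_positives_with_biggest_common_factor_and_negatives_with_mirror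
  unfold replace_positives_with_biggest_common_factor_and_negatives_with_mirror
  unfold replace_positives_with_biggest_common_factor_and_negatives_with_mirror_alt
  unfold get_biggest_common_factor_of_all_positives
  dsimp only
  rw [PySem.List.foldl_append_singleton_eq_map]
  apply List.map_congr_left
  intro x hx
  by_cases hpos : x > 0
  · rw [if_pos hpos, if_pos hpos]
    have hrel := gcd_fold_rel lst none 0 (Or.inl ⟨rfl, rfl⟩)
    have hsome := gcd_fold_isSome lst none (Or.inl ⟨x, hx, hpos⟩)
    rcases hrel with ⟨h1, _⟩ | ⟨v, h1, h2, _⟩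
    · rw [h1] at hsome; simp at hsome
    · rw [h1, h2, Option.getD_some]
  · rw [if_neg hpos, if_neg hpos]
    by_cases hneg : x < 0
    · rw [if_pos hneg, if_pos hneg]
      have hb : pvDomInt x = true := List.all_eq_true.mp hdom x hx
      simp only [pvDomInt, decide_eq_true_eq] at hb
      exact get_mirror_eq x hneg hb.1
    · rw [if_neg hneg, if_neg hneg]
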